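-- pv_equiv track=rewrite | github.com/GabCh/Gringo-design3 | design3-h18/src/atlas/vision/robot_detector.py | find_front_and_back
-- ===== SOURCE A (Python) =====
-- import math
--
-- def find_front_and_back(circles: list) -> tuple:
--     last_circle = circles[len(circles) - 1]
--
--     distances = []
--     points = []
--
--     for circle in circles:
--         dist = int(math.sqrt(math.pow(circle[0] - last_circle[0], 2) + math.pow(circle[1] - last_circle[1], 2)))
--         distances.append(dist)
--         points.append((circle, last_circle))
--
--         last_circle = circle
--
--     min_dist = min(distances)
--     back_left, back_right = points[distances.index(min_dist)]
--
--     max_dist = max(distances)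
--     front, front2 = points[distances.index(max_dist)]
--
--     if front == back_left or front == back_right:
--         front = front2
--
--     cross_prod = ((back_left[0] - back_right[0]) * (front[1] - back_right[1]) - (back_left[1] - back_right[1]) * (
--             front[0] - back_right[0]))
--
--     if cross_prod < 0:
--         temp = back_left
--         back_left = back_right
--         back_right = temp
--
--     return front, back_right, back_left
-- ===== SOURCE B (Python) =====
-- import math
--
-- def find_front_and_back(circles: list) -> tuple:
--     last = circles[len(circles) - 1]
--     min_d = max_d = None
--     min_pair = max_pair = None
--     for c in circles:
--         d = int(math.sqrt(math.pow(c[0] - last[0], 2) + math.pow(c[1] - last[1], 2)))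
--         if min_d is None or d < min_d:
--             min_d, min_pair = d, (c, last)
--         if max_d is None or d > max_d:
--             max_d, max_pair = d, (c, last)
--         last = c
--     back_left, back_right = min_pair
--     front, front2 = max_pair
--     if front == back_left or front == back_right:
--         front = front2
--     cross_prod = ((back_left[0] - back_right[0]) * (front[1] - back_right[1])
--                   - (back_left[1] - back_right[1]) * (front[0] - back_right[0]))
--     if cross_prod < 0:
--         back_left, back_right = back_right, back_left
--     return front, back_right, back_left
-- ===== Notes on version B (the rewrite author's own statement) =====
-- stated objective: alternative
-- what changed: B drops A's parallel distances/points lists and the four whole-list rescans (min, .index, max, .index) and instead tracks the running first-minimal and first-maximal consecutive pair in the single loop over circles, with strict comparisons preserving A's first-occurrence tie-breaking.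
import Mathlib
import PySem

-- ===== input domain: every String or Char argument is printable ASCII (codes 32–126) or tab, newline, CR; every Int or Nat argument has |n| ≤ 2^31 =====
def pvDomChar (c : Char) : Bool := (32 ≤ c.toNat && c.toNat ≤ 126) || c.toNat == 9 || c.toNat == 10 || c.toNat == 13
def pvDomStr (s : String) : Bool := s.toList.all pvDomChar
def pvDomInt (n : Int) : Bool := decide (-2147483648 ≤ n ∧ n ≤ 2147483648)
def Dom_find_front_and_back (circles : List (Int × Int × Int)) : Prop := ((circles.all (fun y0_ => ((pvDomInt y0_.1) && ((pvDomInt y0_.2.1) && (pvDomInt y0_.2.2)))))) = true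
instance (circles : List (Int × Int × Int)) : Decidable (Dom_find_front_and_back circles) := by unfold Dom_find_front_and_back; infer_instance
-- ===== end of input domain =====

-- B replaces A's parallel distances/points lists and the four rescans (min, .index, max, .index)
-- by one fold tracking the running first-minimal and first-maximal consecutive pair (objective: alternative).

-- Shared by both ports: exact integer model of the CPython float expression
-- int(math.sqrt(math.pow(dx, 2) + math.pow(dy, 2))) on |dx|,|dy| ≤ 2^33:
-- pvFl rounds a nonnegative integer to the nearest IEEE-754 double (round-half-even), modelling
-- math.pow(·, 2) and float addition (both correctly rounded); pvSqrtInt is the truncated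
-- correctly-rounded square root (result is Nat.sqrt m, +1 exactly when sqrt m lies strictly
-- above the midpoint below the next integer; ties are impossible in this range).
def pvFl (n : Nat) : Nat :=
  if n < 2 ^ 53 then n
  else
    let e := Nat.log2 n
    let k := e - 52
    let q := n / 2 ^ k
    let r := n % 2 ^ k
    if 2 * r < 2 ^ k then q * 2 ^ k
    else if 2 * r > 2 ^ k then (q + 1) * 2 ^ k
    else (if q % 2 = 0 then q else q + 1) * 2 ^ k

def pvSqrtInt (m : Nat) : Nat :=
  if m = 0 then 0
  else
    let s := Nat.sqrt m
    let t := s + 1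
    let e := Nat.log2 t
    let d := if t = 2 ^ e then 53 - e else 52 - e
    if m * 4 ^ d > (t * 2 ^ d - 1) ^ 2 then t else s

def pvDist (c l : Int × Int × Int) : Int :=
  let dx := c.1 - l.1
  let dy := c.2.1 - l.2.1
  (pvSqrtInt (pvFl (pvFl (dx * dx).natAbs + pvFl (dy * dy).natAbs)) : Int)

-- ===== PORT A =====
def find_front_and_back (circles : List (Int × Int × Int)) : (Int × Int × Int) × (Int × Int × Int) × (Int × Int × Int) :=
  match PySem.List.pyGet? circles ((circles.length : Int) - 1) with
  | none => ((0, 0, 0), (0, 0, 0), (0, 0, 0))  -- IndexError on [], excluded by Pre_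
  | some last0 =>
    let st := circles.foldl
      (fun (st : List Int × List ((Int × Int × Int) × (Int × Int × Int)) × (Int × Int × Int)) circle =>
        let dist := pvDist circle st.2.2
        (st.1 ++ [dist], st.2.1 ++ [(circle, st.2.2)], circle))
      ([], [], last0)
    let distances := st.1
    let points := st.2.1
    match PySem.List.min? distances (fun y => y) with
    | none => ((0, 0, 0), (0, 0, 0), (0, 0, 0))  -- min([]) ValueError, unreachable under Pre_
    | some min_dist =>
      match PySem.List.index? distances min_dist with
      | none => ((0, 0, 0), (0, 0, 0), (0, 0, 0))
      | some i =>
        match PySem.List.pyGet? points (i : Int) with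
        | none => ((0, 0, 0), (0, 0, 0), (0, 0, 0))
        | some (back_left, back_right) =>
          match PySem.List.max? distances (fun y => y) with
          | none => ((0, 0, 0), (0, 0, 0), (0, 0, 0))
          | some max_dist =>
            match PySem.List.index? distances max_dist with
            | none => ((0, 0, 0), (0, 0, 0), (0, 0, 0))
            | some j =>
              match PySem.List.pyGet? points (j : Int) with
              | none => ((0, 0, 0), (0, 0, 0), (0, 0, 0))
              | some (front0, front2) =>
                let front := if front0 = back_left ∨ front0 = back_right then front2 else front0
                let cross_prod := (back_left.1 - back_right.1) * (front.2.1 - back_right.2.1) -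
                    (back_left.2.1 - back_right.2.1) * (front.1 - back_right.1)
                if cross_prod < 0 then (front, back_left, back_right)
                else (front, back_right, back_left)

-- ===== PORT B =====
def find_front_and_back_alt (circles : List (Int × Int × Int)) : (Int × Int × Int) × (Int × Int × Int) × (Int × Int × Int) :=
  match PySem.List.pyGet? circles ((circles.length : Int) - 1) with
  | none => ((0, 0, 0), (0, 0, 0), (0, 0, 0))  -- IndexError on [], excluded by Pre_
  | some last0 =>
    let st := circles.foldl
      (fun (st : Option (Int × ((Int × Int × Int) × (Int × Int × Int))) ×
                 Option (Int × ((Int × Int × Int) × (Int × Int × Int))) × (Int × Int × Int)) c =>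
        let d := pvDist c st.2.2
        let mn := match st.1 with
          | none => some (d, (c, st.2.2))
          | some (m, p) => if d < m then some (d, (c, st.2.2)) else some (m, p)
        let mx := match st.2.1 with
          | none => some (d, (c, st.2.2))
          | some (m, p) => if m < d then some (d, (c, st.2.2)) else some (m, p)
        (mn, mx, c))
      (none, none, last0)
    match st.1, st.2.1 with
    | some (_, (back_left, back_right)), some (_, (front0, front2)) =>
      let front := if front0 = back_left ∨ front0 = back_right then front2 else front0
      let cross_prod := (back_left.1 - back_right.1) * (front.2.1 - back_right.2.1) -
          (back_left.2.1 - back_right.2.1) * (front.1 - back_right.1)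
      let bb := if cross_prod < 0 then (back_right, back_left) else (back_left, back_right)
      (front, bb.2, bb.1)
    | _, _ => ((0, 0, 0), (0, 0, 0), (0, 0, 0))  -- unpacking None, unreachable under Pre_

-- ===== PRECONDITION & SPEC =====
-- Pre_ excludes only the empty list, on which A raises IndexError (circles[-1]).
def Pre_find_front_and_back (circles : List (Int × Int × Int)) : Prop := circles ≠ []
instance (circles : List (Int × Int × Int)) : Decidable (Pre_find_front_and_back circles) := by unfold Pre_find_front_and_back; infer_instance
def pvWitness_find_front_and_back : (List (Int × Int × Int)) := [(0, 0, 0), (3, 4, 0)]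

def Spec_find_front_and_back (circles : List (Int × Int × Int)) (out : (Int × Int × Int) × (Int × Int × Int) × (Int × Int × Int)) : Prop := out = find_front_and_back_alt circles
instance (circles : List (Int × Int × Int)) (out : (Int × Int × Int) × (Int × Int × Int) × (Int × Int × Int)) : Decidable (Spec_find_front_and_back circles out) := by unfold Spec_find_front_and_back; infer_instance

-- ===== CLAIM (what is proved, stated in full; the proofs are below) =====
def Claim_equal_find_front_and_back : Prop := ∀ (circles : List (Int × Int × Int)), Dom_find_front_and_back circles → Pre_find_front_and_back circles → Spec_find_front_and_back circles (find_front_and_back circles)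

-- ===== LEMMAS AND PROOFS =====

-- the sequence of (distance, (circle, previous circle)) pairs both loops walk
def pvSeq (last : Int × Int × Int) : List (Int × Int × Int) → List (Int × ((Int × Int × Int) × (Int × Int × Int)))
  | [] => []
  | c :: cs => (pvDist c last, (c, last)) :: pvSeq c cs

-- first minimal / first maximal element of the pair sequence (head wins ties)
def pvKeepMin (x : Int × ((Int × Int × Int) × (Int × Int × Int)))
    (r : Option (Int × ((Int × Int × Int) × (Int × Int × Int)))) :
    Option (Int × ((Int × Int × Int) × (Int × Int × Int))) :=
  match r with
  | none => some x
  | some y => if x.1 ≤ y.1 then some x else some y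

def pvKeepMax (x : Int × ((Int × Int × Int) × (Int × Int × Int)))
    (r : Option (Int × ((Int × Int × Int) × (Int × Int × Int)))) :
    Option (Int × ((Int × Int × Int) × (Int × Int × Int))) :=
  match r with
  | none => some x
  | some y => if y.1 ≤ x.1 then some x else some y

def pvFirstMin : List (Int × ((Int × Int × Int) × (Int × Int × Int))) → Option (Int × ((Int × Int × Int) × (Int × Int × Int)))
  | [] => none
  | x :: L => pvKeepMin x (pvFirstMin L)

def pvFirstMax : List (Int × ((Int × Int × Int) × (Int × Int × Int))) → Option (Int × ((Int × Int × Int) × (Int × Int × Int)))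
  | [] => none
  | x :: L => pvKeepMax x (pvFirstMax L)

theorem pv_afold (cs : List (Int × Int × Int)) : ∀ (last : Int × Int × Int)
    (accD : List Int) (accP : List ((Int × Int × Int) × (Int × Int × Int))),
    cs.foldl (fun (st : List Int × List ((Int × Int × Int) × (Int × Int × Int)) × (Int × Int × Int)) circle =>
        let dist := pvDist circle st.2.2
        (st.1 ++ [dist], st.2.1 ++ [(circle, st.2.2)], circle)) (accD, accP, last)
      = (accD ++ (pvSeq last cs).map Prod.fst, accP ++ (pvSeq last cs).map Prod.snd, cs.getLastD last) := by
  induction cs with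
  | nil => intro last accD accP; simp [pvSeq]
  | cons c cs ih =>
    intro last accD accP
    simp only [List.foldl_cons, ih, pvSeq, List.map_cons, List.getLastD_cons]
    simp
def pvMinStep (o : Option (Int × ((Int × Int × Int) × (Int × Int × Int))))
    (x : Int × ((Int × Int × Int) × (Int × Int × Int))) :
    Option (Int × ((Int × Int × Int) × (Int × Int × Int))) :=
  match o with
  | none => some x
  | some (m, p) => if x.1 < m then some x else some (m, p)

def pvMaxStep (o : Option (Int × ((Int × Int × Int) × (Int × Int × Int))))
    (x : Int × ((Int × Int × Int) × (Int × Int × Int))) :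
    Option (Int × ((Int × Int × Int) × (Int × Int × Int))) :=
  match o with
  | none => some x
  | some (m, p) => if m < x.1 then some x else some (m, p)

theorem pv_bfold (cs : List (Int × Int × Int)) : ∀ (last : Int × Int × Int)
    (mn mx : Option (Int × ((Int × Int × Int) × (Int × Int × Int)))),
    cs.foldl (fun (st : Option (Int × ((Int × Int × Int) × (Int × Int × Int))) ×
                 Option (Int × ((Int × Int × Int) × (Int × Int × Int))) × (Int × Int × Int)) c =>
        let d := pvDist c st.2.2
        let mn := match st.1 with
          | none => some (d, (c, st.2.2))
          | some (m, p) => if d < m then some (d, (c, st.2.2)) else some (m, p)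
        let mx := match st.2.1 with
          | none => some (d, (c, st.2.2))
          | some (m, p) => if m < d then some (d, (c, st.2.2)) else some (m, p)
        (mn, mx, c)) (mn, mx, last)
      = ((pvSeq last cs).foldl pvMinStep mn, (pvSeq last cs).foldl pvMaxStep mx, cs.getLastD last) := by
  induction cs with
  | nil => intro last mn mx; simp [pvSeq]
  | cons c cs ih =>
    intro last mn mx
    simp only [List.foldl_cons, ih, pvSeq, List.getLastD_cons]
    rfl
-- B's running fold computes the first minimal / maximal element
def pvCombMin (mn r : Option (Int × ((Int × Int × Int) × (Int × Int × Int)))) :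
    Option (Int × ((Int × Int × Int) × (Int × Int × Int))) :=
  match mn, r with
  | none, r => r
  | some x, none => some x
  | some x, some y => if y.1 < x.1 then some y else some x

def pvCombMax (mx r : Option (Int × ((Int × Int × Int) × (Int × Int × Int)))) :
    Option (Int × ((Int × Int × Int) × (Int × Int × Int))) :=
  match mx, r with
  | none, r => r
  | some x, none => some x
  | some x, some y => if x.1 < y.1 then some y else some x

theorem pv_foldl_minstep (L : List (Int × ((Int × Int × Int) × (Int × Int × Int)))) :
    ∀ mn, L.foldl pvMinStep mn = pvCombMin mn (pvFirstMin L) := by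
  induction L with
  | nil => intro mn; cases mn <;> simp [pvFirstMin, pvCombMin]
  | cons x L ih =>
    intro mn
    simp only [List.foldl_cons, ih, pvFirstMin]
    cases mn with
    | none =>
      cases h : pvFirstMin L <;>
        simp only [pvMinStep, pvKeepMin, pvCombMin] <;>
        (try split_ifs) <;> (try simp only [pvCombMin]) <;> (try split_ifs) <;>
        first | rfl | omega
    | some z =>
      cases h : pvFirstMin L <;>
        simp only [pvMinStep, pvKeepMin, pvCombMin] <;>
        (try split_ifs) <;> (try simp only [pvCombMin]) <;> (try split_ifs) <;>
        first | rfl | omega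

theorem pv_foldl_maxstep (L : List (Int × ((Int × Int × Int) × (Int × Int × Int)))) :
    ∀ mx, L.foldl pvMaxStep mx = pvCombMax mx (pvFirstMax L) := by
  induction L with
  | nil => intro mx; cases mx <;> simp [pvFirstMax, pvCombMax]
  | cons x L ih =>
    intro mx
    simp only [List.foldl_cons, ih, pvFirstMax]
    cases mx with
    | none =>
      cases h : pvFirstMax L <;>
        simp only [pvMaxStep, pvKeepMax, pvCombMax] <;>
        (try split_ifs) <;> (try simp only [pvCombMax]) <;> (try split_ifs) <;>
        first | rfl | omega
    | some z =>
      cases h : pvFirstMax L <;>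
        simp only [pvMaxStep, pvKeepMax, pvCombMax] <;>
        (try split_ifs) <;> (try simp only [pvCombMax]) <;> (try split_ifs) <;>
        first | rfl | omega

theorem pv_foldl_minstep_none (L : List (Int × ((Int × Int × Int) × (Int × Int × Int)))) :
    L.foldl pvMinStep none = pvFirstMin L := by
  rw [pv_foldl_minstep]; cases pvFirstMin L <;> rfl

theorem pv_foldl_maxstep_none (L : List (Int × ((Int × Int × Int) × (Int × Int × Int)))) :
    L.foldl pvMaxStep none = pvFirstMax L := by
  rw [pv_foldl_maxstep]; cases pvFirstMax L <;> rfl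

-- value of the running min/max as foldl over the projections
def pvMinVal (d : Int) (r : Option (Int × ((Int × Int × Int) × (Int × Int × Int)))) : Int :=
  match r with
  | none => d
  | some y => min d y.1

def pvMaxVal (d : Int) (r : Option (Int × ((Int × Int × Int) × (Int × Int × Int)))) : Int :=
  match r with
  | none => d
  | some y => max d y.1

theorem pv_foldl_min_fst (L : List (Int × ((Int × Int × Int) × (Int × Int × Int)))) :
    ∀ d : Int, (L.map Prod.fst).foldl min d = pvMinVal d (pvFirstMin L) := by
  induction L with
  | nil => intro d; simp [pvFirstMin, pvMinVal]
  | cons x L ih =>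
    intro d
    simp only [List.map_cons, List.foldl_cons, ih, pvFirstMin]
    cases h : pvFirstMin L <;>
      simp only [pvKeepMin, pvMinVal] <;> (try split_ifs) <;> (try simp only [pvMinVal]) <;> omega

theorem pv_foldl_max_fst (L : List (Int × ((Int × Int × Int) × (Int × Int × Int)))) :
    ∀ d : Int, (L.map Prod.fst).foldl max d = pvMaxVal d (pvFirstMax L) := by
  induction L with
  | nil => intro d; simp [pvFirstMax, pvMaxVal]
  | cons x L ih =>
    intro d
    simp only [List.map_cons, List.foldl_cons, ih, pvFirstMax]
    cases h : pvFirstMax L <;>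
      simp only [pvKeepMax, pvMaxVal] <;> (try split_ifs) <;> (try simp only [pvMaxVal]) <;> omega

theorem pvFirstMin_ne_none (x : Int × ((Int × Int × Int) × (Int × Int × Int)))
    (L : List (Int × ((Int × Int × Int) × (Int × Int × Int)))) : pvFirstMin (x :: L) ≠ none := by
  simp only [pvFirstMin]
  cases pvFirstMin L <;> simp only [pvKeepMin] <;> (try split_ifs) <;> simp

theorem pvFirstMax_ne_none (x : Int × ((Int × Int × Int) × (Int × Int × Int)))
    (L : List (Int × ((Int × Int × Int) × (Int × Int × Int)))) : pvFirstMax (x :: L) ≠ none := by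
  simp only [pvFirstMax]
  cases pvFirstMax L <;> simp only [pvKeepMax] <;> (try split_ifs) <;> simp

-- A's min / index / points[i] pipeline also lands on the first minimal element
theorem pv_amin (L : List (Int × ((Int × Int × Int) × (Int × Int × Int)))) :
    ∀ m q, pvFirstMin L = some (m, q) →
      PySem.List.min? (L.map Prod.fst) (fun y => y) = some m ∧
      ∃ i : Nat, PySem.List.index? (L.map Prod.fst) m = some i ∧
        PySem.List.pyGet? (L.map Prod.snd) (i : Int) = some q := by
  induction L with
  | nil => intro m q h; simp [pvFirstMin] at h
  | cons x L ih =>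
    intro m q h
    obtain ⟨d, p⟩ := x
    simp only [pvFirstMin] at h
    have hmin : PySem.List.min? (((d, p) :: L).map Prod.fst) (fun y => y)
        = some ((L.map Prod.fst).foldl min d) := by
      simpa using PySem.List.min?_id_cons (x := d) (t := L.map Prod.fst)
    cases hF : pvFirstMin L with
    | none =>
      have hL : L = [] := by
        cases L with
        | nil => rfl
        | cons y t => exact absurd hF (pvFirstMin_ne_none y t)
      subst hL
      rw [hF] at h
      simp only [pvKeepMin] at h
      injection h with h'
      injection h' with h1 h2
      subst h1; subst h2
      refine ⟨by simpa using hmin, 0, ?_, ?_⟩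
      · simp only [List.map_cons]; rw [PySem.List.index?_cons_self]
      · simp only [List.map_cons]; simp
    | some y =>
      obtain ⟨m', q'⟩ := y
      rw [hF] at h
      simp only [pvKeepMin] at h
      obtain ⟨hm', i, hi, hg⟩ := ih m' q' hF
      by_cases hd : d ≤ m'
      · rw [if_pos hd] at h
        injection h with h'
        injection h' with h1 h2
        subst h1; subst h2
        refine ⟨?_, 0, ?_, ?_⟩
        · rw [hmin, pv_foldl_min_fst L d, hF]; simp only [pvMinVal, Option.some.injEq]; omega
        · simp only [List.map_cons]; rw [PySem.List.index?_cons_self]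
        · simp only [List.map_cons]; simp
      · rw [if_neg hd] at h
        injection h with h'
        injection h' with h1 h2
        subst h1; subst h2
        refine ⟨?_, i + 1, ?_, ?_⟩
        · rw [hmin, pv_foldl_min_fst L d, hF]; simp only [pvMinVal, Option.some.injEq]; omega
        · rw [show ((d, p) :: L).map Prod.fst = d :: L.map Prod.fst from rfl]
          rw [PySem.List.index?_cons_of_ne (List.map Prod.fst L) (by omega), hi]; rfl
        · rw [show ((d, p) :: L).map Prod.snd = p :: L.map Prod.snd from rfl]
          rw [show ((i + 1 : Nat) : Int) = (i : Int) + 1 by push_cast; ring]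
          rw [PySem.List.pyGet?_cons_succ, hg]

theorem pv_amax (L : List (Int × ((Int × Int × Int) × (Int × Int × Int)))) :
    ∀ m q, pvFirstMax L = some (m, q) →
      PySem.List.max? (L.map Prod.fst) (fun y => y) = some m ∧
      ∃ i : Nat, PySem.List.index? (L.map Prod.fst) m = some i ∧
        PySem.List.pyGet? (L.map Prod.snd) (i : Int) = some q := by
  induction L with
  | nil => intro m q h; simp [pvFirstMax] at h
  | cons x L ih =>
    intro m q h
    obtain ⟨d, p⟩ := x
    simp only [pvFirstMax] at h
    have hmax : PySem.List.max? (((d, p) :: L).map Prod.fst) (fun y => y)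
        = some ((L.map Prod.fst).foldl max d) := by
      simpa using PySem.List.max?_id_cons (x := d) (t := L.map Prod.fst)
    cases hF : pvFirstMax L with
    | none =>
      have hL : L = [] := by
        cases L with
        | nil => rfl
        | cons y t => exact absurd hF (pvFirstMax_ne_none y t)
      subst hL
      rw [hF] at h
      simp only [pvKeepMax] at h
      injection h with h'
      injection h' with h1 h2
      subst h1; subst h2
      refine ⟨by simpa using hmax, 0, ?_, ?_⟩
      · simp only [List.map_cons]; rw [PySem.List.index?_cons_self]
      · simp only [List.map_cons]; simp
    | some y =>
      obtain ⟨m', q'⟩ := y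
      rw [hF] at h
      simp only [pvKeepMax] at h
      obtain ⟨hm', i, hi, hg⟩ := ih m' q' hF
      by_cases hd : m' ≤ d
      · rw [if_pos hd] at h
        injection h with h'
        injection h' with h1 h2
        subst h1; subst h2
        refine ⟨?_, 0, ?_, ?_⟩
        · rw [hmax, pv_foldl_max_fst L d, hF]; simp only [pvMaxVal, Option.some.injEq]; omega
        · simp only [List.map_cons]; rw [PySem.List.index?_cons_self]
        · simp only [List.map_cons]; simp
      · rw [if_neg hd] at h
        injection h with h'
        injection h' with h1 h2
        subst h1; subst h2
        refine ⟨?_, i + 1, ?_, ?_⟩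
        · rw [hmax, pv_foldl_max_fst L d, hF]; simp only [pvMaxVal, Option.some.injEq]; omega
        · rw [show ((d, p) :: L).map Prod.fst = d :: L.map Prod.fst from rfl]
          rw [PySem.List.index?_cons_of_ne (List.map Prod.fst L) (by omega), hi]; rfl
        · rw [show ((d, p) :: L).map Prod.snd = p :: L.map Prod.snd from rfl]
          rw [show ((i + 1 : Nat) : Int) = (i : Int) + 1 by push_cast; ring]
          rw [PySem.List.pyGet?_cons_succ, hg]

-- ===== VERDICT (by name: the statement is the Claim_ definition above) =====
theorem find_front_and_back_spec : Claim_equal_find_front_and_back := by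
  intro circles _ hpre
  unfold Spec_find_front_and_back
  obtain ⟨c, cs, rfl⟩ : ∃ c cs, circles = c :: cs := by
    cases circles with
    | nil => exact absurd rfl hpre
    | cons c cs => exact ⟨c, cs, rfl⟩
  have hlast : PySem.List.pyGet? (c :: cs) (((c :: cs).length : Int) - 1)
      = some ((c :: cs).getLastD c) := by
    have h1 : (((c :: cs).length : Int) - 1) = ((cs.length : Nat) : Int) := by
      simp only [List.length_cons]
      push_cast
      omega
    rw [h1, PySem.List.pyGet?_natCast]
    simp [List.getElem?_eq_getElem, List.getLastD_eq_getLast?, List.getLast?_eq_getElem?]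
  set last0 := (c :: cs).getLastD c with hl0
  obtain ⟨mn, qmin, hFmin⟩ : ∃ m q, pvFirstMin (pvSeq last0 (c :: cs)) = some (m, q) := by
    cases hF : pvFirstMin (pvSeq last0 (c :: cs)) with
    | none => exact absurd hF (by simp only [pvSeq]; exact pvFirstMin_ne_none _ _)
    | some y => obtain ⟨a, b⟩ := y; exact ⟨a, b, rfl⟩
  obtain ⟨mx, qmax, hFmax⟩ : ∃ m q, pvFirstMax (pvSeq last0 (c :: cs)) = some (m, q) := by
    cases hF : pvFirstMax (pvSeq last0 (c :: cs)) with
    | none => exact absurd hF (by simp only [pvSeq]; exact pvFirstMax_ne_none _ _)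
    | some y => obtain ⟨a, b⟩ := y; exact ⟨a, b, rfl⟩
  obtain ⟨hmin?, imin, hidxmin, hgetmin⟩ := pv_amin _ _ _ hFmin
  obtain ⟨hmax?, imax, hidxmax, hgetmax⟩ := pv_amax _ _ _ hFmax
  obtain ⟨bl, br⟩ := qmin
  obtain ⟨f0, f2⟩ := qmax
  unfold find_front_and_back find_front_and_back_alt
  rw [hlast]
  simp only [pv_afold, pv_bfold, List.nil_append, pv_foldl_minstep_none, pv_foldl_maxstep_none,
    hFmin, hFmax, hmin?, hidxmin, hgetmin, hmax?, hidxmax, hgetmax]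
  split_ifs <;> rfl
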